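-- pv_equiv track=rewrite | github.com/lbellomo/etudes | aoc/2023/py_day_01/main.py | find_fist_and_last
-- ===== SOURCE A (Python) =====
-- def find_fist_and_last(line: str) -> int:
--     digits = [ch for ch in line if ch.isdigit()]
--     first = digits[0]
--     if len(digits) == 1:
--         last = first
--     else:
--         last = digits[-1]
--
--     number = int(first + last)
--     return number
-- ===== SOURCE B (Python) =====
-- def find_fist_and_last(line: str) -> int:
--     for ch in line:
--         if ch.isdigit():
--             first = ch
--             break
--     else:
--         raise IndexError("no digit in line")
--     for ch in reversed(line):
--         if ch.isdigit():
--             last = ch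
--             break
--     return int(first + last)
-- ===== Notes on version B (the rewrite author's own statement) =====
-- stated objective: simpler
-- what changed: B drops the intermediate list of all digit characters and instead scans forward for the first digit and backward (over reversed(line)) for the last digit, keeping only those two characters.
import Mathlib
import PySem

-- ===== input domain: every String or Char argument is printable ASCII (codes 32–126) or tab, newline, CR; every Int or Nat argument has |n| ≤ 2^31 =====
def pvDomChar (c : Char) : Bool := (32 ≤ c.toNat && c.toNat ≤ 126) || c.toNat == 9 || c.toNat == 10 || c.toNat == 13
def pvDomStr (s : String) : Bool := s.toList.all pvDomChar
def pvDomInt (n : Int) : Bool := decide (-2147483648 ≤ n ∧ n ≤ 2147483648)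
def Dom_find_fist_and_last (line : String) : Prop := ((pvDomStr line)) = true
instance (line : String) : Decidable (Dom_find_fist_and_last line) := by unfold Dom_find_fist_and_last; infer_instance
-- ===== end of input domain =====

-- B replaces A's full list of digit characters by a forward scan for the first digit and a
-- backward scan (over the reversed line) for the last digit (objective: simpler).
-- Pre_ excludes lines without any digit character, on which A raises IndexError.

-- ===== PORT A =====
def find_fist_and_last (line : String) : Int :=
  let digits := line.toList.filter PySem.Chars.isdigit
  match PySem.List.pyGet? digits 0 with
  | none => 0  -- IndexError: outside Pre_
  | some first =>
    let last := if digits.length = 1 then first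
                else (PySem.List.pyGet? digits (-1)).getD first
    (PySem.Int.ofChars? [first, last]).getD 0

-- ===== PORT B =====
def find_fist_and_last_alt (line : String) : Int :=
  match line.toList.find? PySem.Chars.isdigit with
  | none => 0  -- IndexError: outside Pre_
  | some first =>
    match line.toList.reverse.find? PySem.Chars.isdigit with
    | none => 0  -- unreachable when a first digit exists
    | some last => (PySem.Int.ofChars? [first, last]).getD 0

-- ===== PRECONDITION & SPEC =====
-- Pre_: the line contains at least one digit character (otherwise A raises IndexError).
def Pre_find_fist_and_last (line : String) : Prop :=
  line.toList.any PySem.Chars.isdigit = true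
instance (line : String) : Decidable (Pre_find_fist_and_last line) := by
  unfold Pre_find_fist_and_last; infer_instance

def pvWitness_find_fist_and_last : String := "ab3cd7e"

def Spec_find_fist_and_last (line : String) (out : Int) : Prop := out = find_fist_and_last_alt line
instance (line : String) (out : Int) : Decidable (Spec_find_fist_and_last line out) := by unfold Spec_find_fist_and_last; infer_instance

-- ===== CLAIM (what is proved, stated in full; the proofs are below) =====
def Claim_equal_find_fist_and_last : Prop := ∀ (line : String), Dom_find_fist_and_last line → Pre_find_fist_and_last line → Spec_find_fist_and_last line (find_fist_and_last line)

-- ===== LEMMAS AND PROOFS =====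

-- the first element of the filtered list is the first element satisfying the predicate
theorem head?_filter_eq_find? {α : Type} (p : α → Bool) (l : List α) :
    (l.filter p).head? = l.find? p := by
  induction l with
  | nil => rfl
  | cons a t ih =>
    by_cases h : p a = true
    · simp [h]
    · simp [h, ih]

-- the last element of the filtered list is the first element of the reversal satisfying p
theorem getLast?_filter_eq_find?_reverse {α : Type} (p : α → Bool) (l : List α) :
    (l.filter p).getLast? = l.reverse.find? p := by
  rw [← head?_filter_eq_find?, List.filter_reverse, List.head?_reverse]

-- ===== VERDICT (by name: the statement is the Claim_ definition above) =====
theorem find_fist_and_last_spec : Claim_equal_find_fist_and_last := by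
  intro line _ hpre
  unfold Spec_find_fist_and_last find_fist_and_last find_fist_and_last_alt
  have hne : line.toList.filter PySem.Chars.isdigit ≠ [] := by
    rw [← List.length_pos_iff, List.length_filter_pos_iff]
    unfold Pre_find_fist_and_last at hpre
    simpa [List.any_eq_true] using hpre
  obtain ⟨first, rest, hd⟩ := List.exists_cons_of_ne_nil hne
  have hfind : line.toList.find? PySem.Chars.isdigit = some first := by
    rw [← head?_filter_eq_find?, hd]; rfl
  have hlast : ∃ last, (line.toList.filter PySem.Chars.isdigit).getLast? = some last := by
    rw [hd]; exact ⟨_, List.getLast?_cons⟩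
  obtain ⟨last, hl⟩ := hlast
  have hrev : line.toList.reverse.find? PySem.Chars.isdigit = some last := by
    rw [← getLast?_filter_eq_find?_reverse, hl]
  have hl' : (first :: rest).getLast? = some last := by rw [← hd]; exact hl
  simp only [hd, hfind, hrev, PySem.List.pyGet?_zero_cons, PySem.List.pyGet?_neg_one, hl',
    Option.getD_some]
  split_ifs with h1
  · -- singleton digit list: last = first
    have hr : rest = [] := by simpa using h1
    subst hr
    have : last = first := by simpa using hl'.symm
    simp [this]
  · rfl
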